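-- pv_equiv track=rewrite | github.com/Arsen1302/Code-copy-detector | TestData/solutions/problem_1637_3.py | solution_1637_3
-- ===== SOURCE A (Python) =====
-- def solution_1637_3(nums):
--     n = len(nums)
--
--     dp = [False]*(n+1)
--     dp[0] = True
--
--     for i in range(2,n+1):
--         dp[i] |= nums[i-1] == nums[i-2] and dp[i-2]
--         dp[i] |= i>2 and nums[i-1] == nums[i-2] == nums[i-3] and dp[i-3]
--         dp[i] |= i>2 and nums[i-1] - nums[i-2] == nums[i-2] - nums[i-3] == 1 and dp[i-3]
--
--     return dp[-1]
-- ===== SOURCE B (Python) =====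
-- def solution_1637_3(nums):
--     # Run-length encode, then a 2-state DP over runs: a group of three
--     # consecutive values (v, v+1, v+2) can only cross run boundaries when the
--     # middle run is the single element v+1, so it suffices to track whether the
--     # first element of the current run was already consumed by such a triple.
--     runs = []
--     for x in nums:
--         if runs and runs[-1][0] == x:
--             runs[-1] = (x, runs[-1][1] + 1)
--         else:
--             runs.append((x, 1))
--     m = len(runs)
--     # f[j] = (runs[j:] tileable, runs[j:] tileable with runs[j]'s first element
--     #         already consumed); a leftover of k equal values tiles iff k == 0 or k >= 2
--     f = [(False, False)] * (m + 1)
--     f[m] = (True, False)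
--     for j in range(m - 1, -1, -1):
--         v, c = runs[j]
--         cross = (j + 2 < m and runs[j + 1] == (v + 1, 1)
--                  and runs[j + 2][0] == v + 2)
--         t0 = c >= 2                # tileable leftover of c equal values
--         t1 = c == 1 or c >= 3      # tileable leftover of c - 1
--         t2 = c == 2 or c >= 4      # tileable leftover of c - 2
--         f[j] = ((t0 and f[j + 1][0]) or (cross and t1 and f[j + 2][1]),
--                 (t1 and f[j + 1][0]) or (cross and t2 and f[j + 2][1]))
--     return f[0][0]
-- ===== Notes on version B (the rewrite author's own statement) =====
-- stated objective: alternative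
-- what changed: Replaces A's prefix DP over array indices with a run-length encoding followed by a 2-state DP over the runs, using the fact that a consecutive triple can cross run boundaries only through a singleton middle run.
import Mathlib
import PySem

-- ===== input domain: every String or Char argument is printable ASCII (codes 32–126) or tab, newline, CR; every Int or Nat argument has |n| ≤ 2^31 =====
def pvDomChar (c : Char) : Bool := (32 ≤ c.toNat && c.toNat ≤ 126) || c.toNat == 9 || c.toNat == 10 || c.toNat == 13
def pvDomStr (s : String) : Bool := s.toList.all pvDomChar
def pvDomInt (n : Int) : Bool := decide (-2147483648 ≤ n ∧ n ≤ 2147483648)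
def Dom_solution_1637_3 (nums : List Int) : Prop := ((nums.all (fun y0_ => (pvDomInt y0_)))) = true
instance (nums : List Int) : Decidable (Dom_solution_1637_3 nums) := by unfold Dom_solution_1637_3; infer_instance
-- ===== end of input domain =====

-- B replaces A's prefix DP over array indices by run-length encoding plus a 2-state DP over runs (alternative algorithm).

-- ===== PORT A =====
-- dp[i] |= X is ported as pySetD dp i (pyGetD dp i false || X); all indices the loop reads are in range.
def solution_1637_3_body (nums : List Int) (dp : List Bool) (i : Int) : List Bool :=
  let dp := PySem.List.pySetD dp i (PySem.List.pyGetD dp i false ||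
    ((PySem.List.pyGetD nums (i-1) 0 == PySem.List.pyGetD nums (i-2) 0) &&
     PySem.List.pyGetD dp (i-2) false))
  let dp := PySem.List.pySetD dp i (PySem.List.pyGetD dp i false ||
    (decide (i > 2) &&
     ((PySem.List.pyGetD nums (i-1) 0 == PySem.List.pyGetD nums (i-2) 0) &&
      (PySem.List.pyGetD nums (i-2) 0 == PySem.List.pyGetD nums (i-3) 0)) &&
     PySem.List.pyGetD dp (i-3) false))
  let dp := PySem.List.pySetD dp i (PySem.List.pyGetD dp i false ||
    (decide (i > 2) &&
     ((PySem.List.pyGetD nums (i-1) 0 - PySem.List.pyGetD nums (i-2) 0 ==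
       PySem.List.pyGetD nums (i-2) 0 - PySem.List.pyGetD nums (i-3) 0) &&
      (PySem.List.pyGetD nums (i-2) 0 - PySem.List.pyGetD nums (i-3) 0 == 1)) &&
     PySem.List.pyGetD dp (i-3) false))
  dp

def solution_1637_3 (nums : List Int) : Bool :=
  let n : Int := nums.length
  let dp : List Bool := List.replicate (n + 1).toNat false
  let dp : List Bool := PySem.List.pySetD dp 0 true
  let dp : List Bool := (PySem.List.pyRange 2 (n + 1) 1).foldl (solution_1637_3_body nums) dp
  PySem.List.pyGetD dp (-1) false

-- ===== PORT B =====
-- run-length encoding: 'runs[-1] = (x, runs[-1][1]+1)' is pySetD at -1; 'runs and runs[-1][0]==x' guards the -1 access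
def solution_1637_3_alt_runstep (runs : List (Int × Int)) (x : Int) : List (Int × Int) :=
  if !runs.isEmpty && ((PySem.List.pyGetD runs (-1) (0, 0)).1 == x) then
    PySem.List.pySetD runs (-1) (x, (PySem.List.pyGetD runs (-1) (0, 0)).2 + 1)
  else
    runs ++ [(x, 1)]

-- backward DP over runs; Python short-circuits 'cross and … f[j+2][1]', so the f[j+2] lookup
-- (ported with a default) is only relevant when cross is true, where j+2 is in range
def solution_1637_3_alt_body (runs : List (Int × Int)) (m : Int) (f : List (Bool × Bool)) (j : Int) : List (Bool × Bool) :=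
  let vc := PySem.List.pyGetD runs j (0, 0)
  let v := vc.1
  let c := vc.2
  let cross := decide (j + 2 < m) &&
    decide (PySem.List.pyGetD runs (j+1) (0, 0) = (v + 1, 1)) &&
    decide ((PySem.List.pyGetD runs (j+2) (0, 0)).1 = v + 2)
  let t0 := decide (c ≥ 2)
  let t1 := (c == 1) || decide (c ≥ 3)
  let t2 := (c == 2) || decide (c ≥ 4)
  PySem.List.pySetD f j
    ((t0 && (PySem.List.pyGetD f (j+1) (false, false)).1) ||
       (cross && t1 && (PySem.List.pyGetD f (j+2) (false, false)).2),
     (t1 && (PySem.List.pyGetD f (j+1) (false, false)).1) ||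
       (cross && t2 && (PySem.List.pyGetD f (j+2) (false, false)).2))

def solution_1637_3_alt (nums : List Int) : Bool :=
  let runs : List (Int × Int) := nums.foldl solution_1637_3_alt_runstep []
  let m : Int := runs.length
  let f : List (Bool × Bool) := List.replicate (m + 1).toNat (false, false)
  let f := PySem.List.pySetD f m (true, false)
  let f := (PySem.List.pyRange (m - 1) (-1) (-1)).foldl (solution_1637_3_alt_body runs m) f
  (PySem.List.pyGetD f 0 (false, false)).1

-- ===== PRECONDITION & SPEC =====
def Spec_solution_1637_3 (nums : List Int) (out : Bool) : Prop := out = solution_1637_3_alt nums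
instance (nums : List Int) (out : Bool) : Decidable (Spec_solution_1637_3 nums out) := by unfold Spec_solution_1637_3; infer_instance

-- ===== CLAIM (what is proved, stated in full; the proofs are below) =====
def Claim_equal_solution_1637_3 : Prop := ∀ (nums : List Int), Dom_solution_1637_3 nums → Spec_solution_1637_3 nums (solution_1637_3 nums)

-- ===== LEMMAS AND PROOFS =====

-- Chunks l: l is a concatenation of valid groups (the common specification).
inductive pvChunks : List Int → Prop
  | nil : pvChunks []
  | two (a : Int) (l : List Int) : pvChunks l → pvChunks (a :: a :: l)
  | three_eq (a : Int) (l : List Int) : pvChunks l → pvChunks (a :: a :: a :: l)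
  | three_run (a : Int) (l : List Int) : pvChunks l → pvChunks (a :: (a+1) :: (a+2) :: l)

theorem pvChunks_append {xs ys : List Int} (hx : pvChunks xs) (hy : pvChunks ys) :
    pvChunks (xs ++ ys) := by
  induction hx with
  | nil => simpa using hy
  | two a l _ ih => exact pvChunks.two a _ ih
  | three_eq a l _ ih => exact pvChunks.three_eq a _ ih
  | three_run a l _ ih => exact pvChunks.three_run a _ ih

theorem pvChunks_peel {l : List Int} (h : pvChunks l) :
    l = [] ∨ (∃ ys a, l = ys ++ [a, a] ∧ pvChunks ys) ∨
      (∃ ys a, l = ys ++ [a, a, a] ∧ pvChunks ys) ∨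
      (∃ ys a, l = ys ++ [a, a + 1, a + 2] ∧ pvChunks ys) := by
  induction h with
  | nil => exact Or.inl rfl
  | two a l hl ih =>
    rcases ih with rfl | ⟨ys, b, rfl, hys⟩ | ⟨ys, b, rfl, hys⟩ | ⟨ys, b, rfl, hys⟩
    · exact Or.inr (Or.inl ⟨[], a, rfl, pvChunks.nil⟩)
    · exact Or.inr (Or.inl ⟨a :: a :: ys, b, rfl, pvChunks.two a ys hys⟩)
    · exact Or.inr (Or.inr (Or.inl ⟨a :: a :: ys, b, rfl, pvChunks.two a ys hys⟩))
    · exact Or.inr (Or.inr (Or.inr ⟨a :: a :: ys, b, rfl, pvChunks.two a ys hys⟩))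
  | three_eq a l hl ih =>
    rcases ih with rfl | ⟨ys, b, rfl, hys⟩ | ⟨ys, b, rfl, hys⟩ | ⟨ys, b, rfl, hys⟩
    · exact Or.inr (Or.inr (Or.inl ⟨[], a, rfl, pvChunks.nil⟩))
    · exact Or.inr (Or.inl ⟨a :: a :: a :: ys, b, rfl, pvChunks.three_eq a ys hys⟩)
    · exact Or.inr (Or.inr (Or.inl ⟨a :: a :: a :: ys, b, rfl, pvChunks.three_eq a ys hys⟩))
    · exact Or.inr (Or.inr (Or.inr ⟨a :: a :: a :: ys, b, rfl, pvChunks.three_eq a ys hys⟩))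
  | three_run a l hl ih =>
    rcases ih with rfl | ⟨ys, b, rfl, hys⟩ | ⟨ys, b, rfl, hys⟩ | ⟨ys, b, rfl, hys⟩
    · exact Or.inr (Or.inr (Or.inr ⟨[], a, rfl, pvChunks.nil⟩))
    · exact Or.inr (Or.inl ⟨a :: (a+1) :: (a+2) :: ys, b, rfl, pvChunks.three_run a ys hys⟩)
    · exact Or.inr (Or.inr (Or.inl ⟨a :: (a+1) :: (a+2) :: ys, b, rfl, pvChunks.three_run a ys hys⟩))
    · exact Or.inr (Or.inr (Or.inr ⟨a :: (a+1) :: (a+2) :: ys, b, rfl, pvChunks.three_run a ys hys⟩))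

theorem take2_eq (l : List Int) (h : 2 ≤ l.length) : l.take 2 = [l.getD 0 0, l.getD 1 0] := by
  match l, h with
  | a :: b :: t, _ => simp

theorem take3_eq (l : List Int) (h : 3 ≤ l.length) : l.take 3 = [l.getD 0 0, l.getD 1 0, l.getD 2 0] := by
  match l, h with
  | a :: b :: c :: t, _ => simp

theorem getD_drop (l : List Int) (m k : Nat) (h : m + k < l.length) :
    (l.drop m).getD k 0 = l.getD (m+k) 0 := by
  rw [List.getD_eq_getElem _ _ (by simp; omega), List.getD_eq_getElem _ _ h, List.getElem_drop]

theorem take_app2 (nums : List Int) (j : Nat) (h2 : 2 ≤ j) (hn : j ≤ nums.length) :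
    nums.take j = nums.take (j-2) ++ [nums.getD (j-2) 0, nums.getD (j-1) 0] := by
  have hj : j = (j-2) + 2 := by omega
  rw [hj, List.take_add, take2_eq _ (by simp; omega),
    getD_drop _ _ _ (by omega), getD_drop _ _ _ (by omega)]
  rw [show j-2+0 = j-2 by omega, show j-2+1 = j-1 by omega,
    show j-2+2-2 = j-2 by omega, show j-2+2-1 = j-1 by omega]

theorem take_app3 (nums : List Int) (j : Nat) (h3 : 3 ≤ j) (hn : j ≤ nums.length) :
    nums.take j = nums.take (j-3) ++ [nums.getD (j-3) 0, nums.getD (j-2) 0, nums.getD (j-1) 0] := by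
  have hj : j = (j-3) + 3 := by omega
  rw [hj, List.take_add, take3_eq _ (by simp; omega),
    getD_drop _ _ _ (by omega), getD_drop _ _ _ (by omega), getD_drop _ _ _ (by omega)]
  rw [show j-3+0 = j-3 by omega, show j-3+1 = j-2 by omega, show j-3+2 = j-1 by omega,
    show j-3+3-3 = j-3 by omega, show j-3+3-2 = j-2 by omega, show j-3+3-1 = j-1 by omega]

-- reference recurrence for A's dp array: pvArec nums j = dp[j]
def pvArec (nums : List Int) : Nat → Bool
  | 0 => true
  | 1 => false
  | 2 => nums.getD 1 0 == nums.getD 0 0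
  | (j+3) =>
      (((nums.getD (j+2) 0 == nums.getD (j+1) 0) && pvArec nums (j+1)) ||
       (((nums.getD (j+2) 0 == nums.getD (j+1) 0) && (nums.getD (j+1) 0 == nums.getD j 0)) && pvArec nums j)) ||
      (((nums.getD (j+2) 0 - nums.getD (j+1) 0 == nums.getD (j+1) 0 - nums.getD j 0) && (nums.getD (j+1) 0 - nums.getD j 0 == 1)) && pvArec nums j)

theorem chunks_pair (a b : Int) : pvChunks [a, b] ↔ b = a := by
  constructor
  · intro h; cases h; rfl
  · rintro rfl; exact pvChunks.two _ [] pvChunks.nil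

theorem pvArec_iff_chunks (nums : List Int) :
    ∀ j, j ≤ nums.length → (pvArec nums j = true ↔ pvChunks (nums.take j)) := by
  intro j
  induction j using Nat.strong_induction_on with
  | _ j ih =>
    match j with
    | 0 =>
      intro _
      simpa [pvArec] using pvChunks.nil
    | 1 =>
      intro hn
      cases nums with
      | nil => simp at hn
      | cons a t =>
        simp [pvArec]
        intro h; cases h
    | 2 =>
      intro hn
      have ht : nums.take 2 = [nums.getD 0 0, nums.getD 1 0] := by
        simpa using take_app2 nums 2 (by omega) hn
      rw [ht, chunks_pair]
      simp only [pvArec, beq_iff_eq]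
    | (j+3) =>
      intro hn
      have h2 : nums.take (j+3) = nums.take (j+1) ++ [nums.getD (j+1) 0, nums.getD (j+2) 0] := by
        simpa using take_app2 nums (j+3) (by omega) hn
      have h3 : nums.take (j+3) = nums.take j ++ [nums.getD j 0, nums.getD (j+1) 0, nums.getD (j+2) 0] := by
        simpa using take_app3 nums (j+3) (by omega) hn
      simp only [pvArec, Bool.or_eq_true, Bool.and_eq_true, beq_iff_eq]
      constructor
      · rintro ((⟨hbc, hA⟩ | ⟨⟨hbc, hab⟩, hA⟩) | ⟨⟨hd1, hd2⟩, hA⟩)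
        · rw [h2, hbc]
          exact pvChunks_append ((ih (j+1) (by omega) (by omega)).mp hA)
            (pvChunks.two _ [] pvChunks.nil)
        · rw [h3, hbc, hab]
          exact pvChunks_append ((ih j (by omega) (by omega)).mp hA)
            (pvChunks.three_eq _ [] pvChunks.nil)
        · have hb : nums.getD (j+1) 0 = nums.getD j 0 + 1 := by omega
          have hc : nums.getD (j+2) 0 = nums.getD j 0 + 2 := by omega
          rw [h3, hb, hc]
          exact pvChunks_append ((ih j (by omega) (by omega)).mp hA)
            (pvChunks.three_run _ [] pvChunks.nil)
      · intro h
        have hlen : (nums.take (j+3)).length = j + 3 := by simp; omega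
        rcases pvChunks_peel h with he | ⟨ys, x, hys, hch⟩ | ⟨ys, x, hys, hch⟩ | ⟨ys, x, hys, hch⟩
        · rw [he] at hlen; simp at hlen
        · have hyl : ys.length = j + 1 := by
            have := congrArg List.length hys; simp at this; omega
          have := List.append_inj (hys.symm.trans h2) (by simp [hyl]; omega)
          rcases this with ⟨hys', hx⟩
          simp only [List.cons.injEq, and_true] at hx
          rcases hx with ⟨hx1, hx2⟩
          refine Or.inl (Or.inl ⟨by omega, ?_⟩)
          exact (ih (j+1) (by omega) (by omega)).mpr (hys' ▸ hch)
        · have hyl : ys.length = j := by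
            have := congrArg List.length hys; simp at this; omega
          have := List.append_inj (hys.symm.trans h3) (by simp [hyl]; omega)
          rcases this with ⟨hys', hx⟩
          simp only [List.cons.injEq, and_true] at hx
          rcases hx with ⟨hx1, hx2, hx3⟩
          refine Or.inl (Or.inr ⟨⟨by omega, by omega⟩, ?_⟩)
          exact (ih j (by omega) (by omega)).mpr (hys' ▸ hch)
        · have hyl : ys.length = j := by
            have := congrArg List.length hys; simp at this; omega
          have := List.append_inj (hys.symm.trans h3) (by simp [hyl]; omega)
          rcases this with ⟨hys', hx⟩
          simp only [List.cons.injEq, and_true] at hx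
          rcases hx with ⟨hx1, hx2, hx3⟩
          refine Or.inr ⟨⟨by omega, by omega⟩, ?_⟩
          exact (ih j (by omega) (by omega)).mpr (hys' ▸ hch)

-- generic upward fold over pyRange a b 1 with a per-index invariant
theorem foldl_pyRange_up {β : Type} (f : β → Int → β) (g : Nat → β) (a b : Nat) (hab : a ≤ b)
    (hstep : ∀ i : Nat, a ≤ i → i < b → f (g i) (i : Int) = g (i+1)) :
    (PySem.List.pyRange (a : Int) (b : Int) 1).foldl f (g a) = g b := by
  obtain ⟨k, rfl⟩ : ∃ k, b = a + k := ⟨b - a, by omega⟩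
  clear hab
  induction k generalizing a with
  | zero => rw [PySem.List.pyRange_one_eq_nil (by simp)]; rfl
  | succ k ih =>
    rw [PySem.List.pyRange_one_cons (by push_cast; omega)]
    rw [List.foldl_cons, hstep a (le_refl a) (by omega)]
    have : ((a:Int)) + 1 = ((a+1 : Nat) : Int) := by push_cast; ring
    rw [this]
    have : ((a + (k+1) : Nat) : Int) = (((a+1) + k : Nat) : Int) := by push_cast; ring
    rw [this]
    have egoal : a + (k+1) = (a+1) + k := by omega
    rw [egoal]
    exact ih (a+1) (fun i h1 h2 => hstep i (by omega) (by omega))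

-- generic downward fold over pyRange (b-1) (-1) (-1) with a per-index invariant
theorem foldl_pyRange_down {β : Type} (f : β → Int → β) (g : Nat → β) (b : Nat)
    (hstep : ∀ i : Nat, i < b → f (g (i+1)) (i : Int) = g i) :
    (PySem.List.pyRange ((b : Int) - 1) (-1) (-1)).foldl f (g b) = g 0 := by
  induction b with
  | zero => rw [PySem.List.pyRange_neg_one_eq_nil (by omega)]; rfl
  | succ b ih =>
    have e : ((b + 1 : Nat) : Int) - 1 = (b : Int) := by push_cast; ring
    rw [e, PySem.List.pyRange_neg_one_cons (by omega), List.foldl_cons, hstep b (by omega)]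
    exact ih (fun i h => hstep i (by omega))

-- snapshot of A's dp array once all cells below i are filled
def pvDp (nums : List Int) (i : Nat) : List Bool :=
  (List.range (nums.length + 1)).map (fun j => if j < i then pvArec nums j else false)

theorem length_pvDp (nums : List Int) (i : Nat) : (pvDp nums i).length = nums.length + 1 := by
  simp [pvDp]

theorem getD_pvDp (nums : List Int) (i j : Nat) (hj : j < nums.length + 1) :
    (pvDp nums i).getD j false = if j < i then pvArec nums j else false := by
  rw [List.getD_eq_getElem _ _ (by rw [length_pvDp]; omega)]
  simp [pvDp]

theorem pvDp_set (nums : List Int) (i : Nat) (_hi : i < nums.length + 1) :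
    (pvDp nums i).set i (pvArec nums i) = pvDp nums (i+1) := by
  apply List.ext_getElem
  · simp [pvDp]
  · intro k hk1 hk2
    rw [List.getElem_set]
    simp only [pvDp, List.getElem_map, List.getElem_range]
    have hk : k < nums.length + 1 := by
      simpa [pvDp] using hk2
    by_cases he : i = k
    · subst he; simp
    · have : (k < i) = (k < i + 1) := by
        apply propext; constructor <;> intro <;> omega
      simp [he, this]

theorem getD_set_ne (l : List Bool) (i j : Nat) (v : Bool) (h : i ≠ j) :
    (l.set i v).getD j false = l.getD j false := by
  simp [List.getD_eq_getElem?_getD, List.getElem?_set_ne h]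

theorem getD_set_self (l : List Bool) (i : Nat) (v : Bool) (h : i < l.length) :
    (l.set i v).getD i false = v := by
  rw [List.getD_eq_getElem _ _ (by simp [h]), List.getElem_set, if_pos rfl]

theorem foldl_pyRange_up2 {β : Type} (f : β → Int → β) (g : Nat → β) (n : Nat) (h1 : 1 ≤ n)
    (hstep : ∀ i : Nat, 2 ≤ i → i < n + 1 → f (g i) (i : Int) = g (i+1)) :
    (PySem.List.pyRange 2 ((n : Int) + 1) 1).foldl f (g 2) = g (n+1) := by
  have e : ((n : Int) + 1) = ((n + 1 : Nat) : Int) := by push_cast; ring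
  rw [e]
  have h := foldl_pyRange_up f g 2 (n+1) (by omega) hstep
  exact_mod_cast h

theorem A_step (nums : List Int) (i : Nat) (h2 : 2 ≤ i) (hn : i ≤ nums.length) :
    solution_1637_3_body nums (pvDp nums i) (i : Int) = pvDp nums (i+1) := by
  have hlen : i < (pvDp nums i).length := by rw [length_pvDp]; omega
  have r0 : (pvDp nums i).getD i false = false := by
    rw [getD_pvDp nums i i (by omega)]; simp
  have hss : ∀ v, ((pvDp nums i).set i v).getD i false = v :=
    fun v => getD_set_self _ _ _ hlen
  have e1 : (i : Int) - 1 = ((i - 1 : Nat) : Int) := by omega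
  have e2 : (i : Int) - 2 = ((i - 2 : Nat) : Int) := by omega
  have r2 : (pvDp nums i).getD (i-2) false = pvArec nums (i-2) := by
    rw [getD_pvDp nums i (i-2) (by omega)]; rw [if_pos (by omega)]
  rcases Nat.lt_or_ge i 3 with h3 | h3
  · -- i = 2 : the i>2 clauses are dead
    have hi2 : i = 2 := by omega
    subst hi2
    have hd : decide ((2 : Nat) > (2 : Int)) = false := by simp
    simp only [solution_1637_3_body, e1, e2, PySem.List.pySetD_natCast,
      PySem.List.pyGetD_natCast, List.set_set, hss, r0, r2, hd, Bool.false_and,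
      Bool.or_false, Bool.false_or]
    rw [← pvDp_set nums 2 (by omega)]
    congr 1
    simp [pvArec]
  · -- 3 ≤ i
    have e3 : (i : Int) - 3 = ((i - 3 : Nat) : Int) := by omega
    have r3 : (pvDp nums i).getD (i-3) false = pvArec nums (i-3) := by
      rw [getD_pvDp nums i (i-3) (by omega)]; rw [if_pos (by omega)]
    have rs3 : ∀ v, ((pvDp nums i).set i v).getD (i-3) false = pvArec nums (i-3) := by
      intro v; rw [getD_set_ne _ _ _ _ (by omega), r3]
    have hd : decide ((i : Nat) > (2 : Int)) = true := by simp; omega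
    simp only [solution_1637_3_body, e1, e2, e3, PySem.List.pySetD_natCast,
      PySem.List.pyGetD_natCast, List.set_set, hss, r0, r2, rs3, hd, Bool.true_and,
      Bool.false_or]
    rw [← pvDp_set nums i (by omega)]
    congr 1
    obtain ⟨j, rfl⟩ : ∃ j, i = j + 3 := ⟨i - 3, by omega⟩
    simp only [show j + 3 - 1 = j + 2 from by omega, show j + 3 - 2 = j + 1 from by omega,
      show j + 3 - 3 = j from by omega, pvArec]

theorem solution_eq_arec (nums : List Int) :
    solution_1637_3 nums = pvArec nums nums.length := by
  rcases hne : nums with _ | ⟨x, t⟩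
  · decide
  · rw [← hne]
    have h1 : 1 ≤ nums.length := by rw [hne]; simp
    simp only [solution_1637_3]
    have hinit : PySem.List.pySetD (List.replicate (((nums.length : Int)) + 1).toNat false) 0 true
        = pvDp nums 2 := by
      have e : (((nums.length : Int)) + 1).toNat = nums.length + 1 := by omega
      rw [e, show (0 : Int) = ((0 : Nat) : Int) from rfl, PySem.List.pySetD_natCast]
      apply List.ext_getElem
      · simp [pvDp]
      · intro k hk1 hk2
        rw [List.getElem_set]
        simp only [pvDp, List.getElem_map, List.getElem_range, List.getElem_replicate]
        rcases k with _ | _ | k <;> simp [pvArec]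
    rw [hinit,
      foldl_pyRange_up2 (solution_1637_3_body nums) (pvDp nums) nums.length h1
        (fun i hi1 hi2 => A_step nums i hi1 (by omega))]
    rw [PySem.List.pyGetD_neg_ofNat _ 1 false (by norm_num) (by rw [length_pvDp]; omega)]
    simp [pvDp]

-- ============ B side ============

-- decode a run list back to the flat list
def pvDecode (r : List (Int × Int)) : List Int :=
  r.flatMap (fun p => List.replicate p.2.toNat p.1)

-- well-formed run list: positive counts, adjacent values distinct
def pvWF (r : List (Int × Int)) : Prop :=
  (∀ p ∈ r, 1 ≤ p.2) ∧ List.IsChain (· ≠ ·) (r.map Prod.fst)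

-- clean recursion computed by B's backward loop
def pvTile (k : Int) : Bool := (k == 0) || decide (2 ≤ k)

def pvGrun : List (Int × Int) → Int → Bool
  | [], _ => true
  | [(_,c)], s => pvTile (c - s)
  | (_,c) :: (v1,c1) :: ([] : List (Int × Int)), s =>
      pvTile (c - s) && pvGrun [(v1,c1)] 0
  | (v,c) :: (v1,c1) :: (v2,c2) :: rest2, s =>
      (pvTile (c - s) && pvGrun ((v1,c1) :: (v2,c2) :: rest2) 0) ||
      ((decide (v1 = v+1) && decide (c1 = (1:Int)) && decide (v2 = v+2)) &&
        pvTile (c - s - 1) && pvGrun ((v2,c2) :: rest2) 1)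

theorem pySetD_neg_one_append {α : Type} (init : List α) (p y : α) :
    PySem.List.pySetD (init ++ [p]) (-1) y = init ++ [y] := by
  simp [PySem.List.pySetD, PySem.List.pySet?, PySem.List.pyIdx?]

theorem runstep_spec (acc : List (Int × Int)) (x : Int) (h : pvWF acc) :
    pvWF (solution_1637_3_alt_runstep acc x) ∧
      pvDecode (solution_1637_3_alt_runstep acc x) = pvDecode acc ++ [x] := by
  rcases List.eq_nil_or_concat acc with rfl | ⟨init, ⟨v,c⟩, hacc⟩
  · refine ⟨⟨?_, ?_⟩, ?_⟩
    · intro p hp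
      simp [solution_1637_3_alt_runstep] at hp
      simp [hp]
    · simp [solution_1637_3_alt_runstep]
    · simp [solution_1637_3_alt_runstep, pvDecode]
  · rw [List.concat_eq_append] at hacc
    subst hacc
    have hlast : PySem.List.pyGetD (init ++ [(v,c)]) (-1) ((0:Int),(0:Int)) = (v,c) :=
      PySem.List.pyGetD_neg_one_append_singleton ..
    have hc1 : (1:Int) ≤ c := h.1 (v,c) (by simp)
    by_cases hv : v = x
    · subst hv
      have hres : solution_1637_3_alt_runstep (init ++ [(v,c)]) v = init ++ [(v, c+1)] := by
        simp [solution_1637_3_alt_runstep, hlast, pySetD_neg_one_append]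
      rw [hres]
      refine ⟨⟨?_, ?_⟩, ?_⟩
      · intro p hp
        rcases List.mem_append.mp hp with hp | hp
        · exact h.1 p (List.mem_append.mpr (Or.inl hp))
        · simp at hp; subst hp; simp; omega
      · have h2 := h.2
        simp only [List.map_append, List.map_cons, List.map_nil] at h2 ⊢
        exact h2
      · have e : (c+1).toNat = c.toNat + 1 := by omega
        simp [pvDecode, e, List.replicate_succ']
    · have hres : solution_1637_3_alt_runstep (init ++ [(v,c)]) x = (init ++ [(v,c)]) ++ [(x, 1)] := by
        simp [solution_1637_3_alt_runstep, hlast, hv]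
      rw [hres]
      refine ⟨⟨?_, ?_⟩, ?_⟩
      · intro p hp
        rcases List.mem_append.mp hp with hp | hp
        · exact h.1 p hp
        · simp at hp; subst hp; simp
      · have h2 := h.2
        rw [List.map_append]
        rw [List.isChain_append]
        refine ⟨h2, by simp, ?_⟩
        intro a ha b hb
        simp at hb
        simp [List.getLast?_append] at ha
        subst hb; rw [← ha]; exact hv
      · simp [pvDecode]

theorem runs_fold_spec (xs : List Int) :
    ∀ acc : List (Int × Int), pvWF acc →
      pvWF (xs.foldl solution_1637_3_alt_runstep acc) ∧
        pvDecode (xs.foldl solution_1637_3_alt_runstep acc) = pvDecode acc ++ xs := by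
  induction xs with
  | nil => intro acc h; exact ⟨h, by simp⟩
  | cons x xs ih =>
    intro acc h
    obtain ⟨h1, h2⟩ := runstep_spec acc x h
    obtain ⟨g1, g2⟩ := ih _ h1
    refine ⟨by simpa using g1, ?_⟩
    simp only [List.foldl_cons]
    rw [g2, h2]
    simp

-- tileability of a leftover block of k equal values
def pvTileN (k : Nat) : Prop := k = 0 ∨ 2 ≤ k

theorem chunks_replicate (v : Int) (k : Nat) (h : pvTileN k) :
    pvChunks (List.replicate k v) := by
  induction k using Nat.strong_induction_on with
  | _ k ih =>
    match k, h with
    | 0, _ => exact pvChunks.nil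
    | 1, h => rcases h with h | h <;> omega
    | 2, _ => exact pvChunks.two v [] pvChunks.nil
    | 3, _ => exact pvChunks.three_eq v [] pvChunks.nil
    | (k+4), _ =>
      rw [show List.replicate (k+4) v = v :: v :: List.replicate (k+2) v from by
        simp [List.replicate_succ]]
      exact pvChunks.two v _ (ih (k+2) (by omega) (Or.inr (by omega)))

theorem pvChunks_cases {l : List Int} (h : pvChunks l) :
    l = [] ∨ (∃ a t, l = a :: a :: t ∧ pvChunks t) ∨
      (∃ a t, l = a :: a :: a :: t ∧ pvChunks t) ∨
      (∃ a t, l = a :: (a+1) :: (a+2) :: t ∧ pvChunks t) := by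
  cases h with
  | nil => exact Or.inl rfl
  | two a t ht => exact Or.inr (Or.inl ⟨a, t, rfl, ht⟩)
  | three_eq a t ht => exact Or.inr (Or.inr (Or.inl ⟨a, t, rfl, ht⟩))
  | three_run a t ht => exact Or.inr (Or.inr (Or.inr ⟨a, t, rfl, ht⟩))

-- the key structure lemma: parses of a block of equal values followed by a different tail
theorem chunks_block (v : Int) (k : Nat) (tail : List Int)
    (h : ∀ x ∈ tail.head?, x ≠ v) :
    pvChunks (List.replicate k v ++ tail) ↔
      (pvTileN k ∧ pvChunks tail) ∨
      (∃ t2, 1 ≤ k ∧ pvTileN (k-1) ∧ tail = (v+1) :: (v+2) :: t2 ∧ pvChunks t2) := by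
  induction k using Nat.strong_induction_on with
  | _ k ih =>
  constructor
  · intro hch
    match k with
    | 0 => exact Or.inl ⟨Or.inl rfl, by simpa using hch⟩
    | (k'+1) =>
      rw [List.replicate_succ, List.cons_append] at hch
      rcases pvChunks_cases hch with heq | ⟨a, t, heq, ht⟩ | ⟨a, t, heq, ht⟩ | ⟨a, t, heq, ht⟩
      · exact absurd heq (by simp)
      · simp only [List.cons.injEq] at heq
        obtain ⟨h1, h2⟩ := heq
        subst h1
        rcases k' with _ | k''
        · simp at h2
          exact absurd rfl (h v (by simp [h2]))
        · rw [List.replicate_succ, List.cons_append, List.cons.injEq] at h2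
          obtain ⟨-, h3⟩ := h2
          subst h3
          rcases (ih k'' (by omega)).mp ht with ⟨hT, hc⟩ | ⟨t2, hk, hT, he, hc⟩
          · exact Or.inl ⟨by simp only [pvTileN] at hT ⊢; omega, hc⟩
          · exact Or.inr ⟨t2, by omega, by simp only [pvTileN] at hT ⊢; omega, he, hc⟩
      · simp only [List.cons.injEq] at heq
        obtain ⟨h1, h2⟩ := heq
        subst h1
        rcases k' with _ | (_ | k3)
        · simp at h2
          exact absurd rfl (h v (by simp [h2]))
        · rw [show List.replicate 1 v = [v] from rfl] at h2
          simp only [List.cons_append, List.nil_append, List.cons.injEq] at h2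
          exact absurd rfl (h v (by simp [h2.2]))
        · simp only [List.replicate_succ, List.cons_append, List.cons.injEq] at h2
          obtain ⟨-, -, h3⟩ := h2
          subst h3
          rcases (ih k3 (by omega)).mp ht with ⟨hT, hc⟩ | ⟨t2, hk, hT, he, hc⟩
          · exact Or.inl ⟨by simp only [pvTileN] at hT ⊢; omega, hc⟩
          · exact Or.inr ⟨t2, by omega, by simp only [pvTileN] at hT ⊢; omega, he, hc⟩
      · simp only [List.cons.injEq] at heq
        obtain ⟨h1, h2⟩ := heq
        subst h1
        rcases k' with _ | k''
        · simp at h2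
          exact Or.inr ⟨t, by omega, Or.inl rfl, h2, ht⟩
        · rw [List.replicate_succ, List.cons_append, List.cons.injEq] at h2
          exact absurd h2.1 (by omega)
  · rintro (⟨hT, hc⟩ | ⟨t2, hk, hT, rfl, hc⟩)
    · exact pvChunks_append (chunks_replicate v k hT) hc
    · have he : List.replicate k v ++ (v+1) :: (v+2) :: t2
          = List.replicate (k-1) v ++ ([v, v+1, v+2] ++ t2) := by
        conv_lhs => rw [show k = (k-1)+1 from by omega, List.replicate_succ']
        simp
      rw [he]
      exact pvChunks_append (chunks_replicate v (k-1) hT) (pvChunks.three_run v t2 hc)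

theorem pvWF_tail {p : Int × Int} {rest : List (Int × Int)} (h : pvWF (p :: rest)) :
    pvWF rest := by
  refine ⟨fun q hq => h.1 q (List.mem_cons_of_mem _ hq), ?_⟩
  have h2 := h.2
  simp only [List.map_cons] at h2
  simpa using h2.tail

theorem decode_head_ne {v c : Int} {rest : List (Int × Int)} (h : pvWF ((v,c) :: rest)) :
    ∀ x ∈ (pvDecode rest).head?, x ≠ v := by
  rcases rest with _ | ⟨⟨v1,c1⟩, rest'⟩
  · simp [pvDecode]
  · have hc1 : (1:Int) ≤ c1 := h.1 (v1,c1) (by simp)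
    have hvv : v ≠ v1 := by
      have h2 := h.2
      simp only [List.map_cons, List.isChain_cons_cons] at h2
      exact h2.1
    intro x hx
    obtain ⟨m, hm⟩ : ∃ m, c1.toNat = m + 1 := ⟨c1.toNat - 1, by omega⟩
    have hhd : (pvDecode ((v1,c1) :: rest')).head? = some v1 := by
      simp [pvDecode, hm, List.replicate_succ]
    rw [hhd] at hx
    simp at hx
    subst hx
    exact fun he => hvv he.symm

theorem decode_cons_drop (v c : Int) (rest : List (Int × Int)) (s : Int)
    (hc : 1 ≤ c) (hs0 : 0 ≤ s) (hs1 : s ≤ 1) :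
    (pvDecode ((v,c) :: rest)).drop s.toNat
      = List.replicate (c - s).toNat v ++ pvDecode rest := by
  have hs : s = 0 ∨ s = 1 := by omega
  rcases hs with rfl | rfl
  · simp [pvDecode]
  · obtain ⟨m, hm⟩ : ∃ m, c.toNat = m + 1 := ⟨c.toNat - 1, by omega⟩
    have hm' : (c - 1).toNat = m := by omega
    simp [pvDecode, hm, hm', List.replicate_succ]

theorem pvGrun_iff_chunks : ∀ (r : List (Int × Int)), pvWF r → ∀ s : Int, 0 ≤ s → s ≤ 1 →
    (s = 1 → r ≠ []) →
    (pvGrun r s = true ↔ pvChunks ((pvDecode r).drop s.toNat)) := by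
  suffices H : ∀ n (r : List (Int × Int)), r.length ≤ n → pvWF r → ∀ s : Int, 0 ≤ s → s ≤ 1 →
      (s = 1 → r ≠ []) →
      (pvGrun r s = true ↔ pvChunks ((pvDecode r).drop s.toNat)) by
    exact fun r hWF s h0 h1 h2 => H r.length r le_rfl hWF s h0 h1 h2
  intro n
  induction n with
  | zero =>
    intro r hr hWF s hs0 hs1 hne
    have hrnil : r = [] := by
      rcases r with _ | _
      · rfl
      · simp at hr
    subst hrnil
    have hs : s = 0 := by
      rcases (by omega : s = 0 ∨ s = 1) with h | h
      · exact h
      · exact absurd rfl (hne h)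
    subst hs
    simpa [pvGrun, pvDecode] using pvChunks.nil
  | succ n ih =>
    intro r hr hWF s hs0 hs1 hne
    rcases r with _ | ⟨⟨v,c⟩, rest⟩
    · have hs : s = 0 := by
        rcases (by omega : s = 0 ∨ s = 1) with h | h
        · exact h
        · exact absurd rfl (hne h)
      subst hs
      simpa [pvGrun, pvDecode] using pvChunks.nil
    · have hc : (1:Int) ≤ c := hWF.1 (v,c) (by simp)
      have hk : c - s = (((c - s).toNat : Nat) : Int) := by omega
      rw [decode_cons_drop v c rest s hc hs0 hs1,
        chunks_block v (c - s).toNat (pvDecode rest) (decode_head_ne hWF)]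
      have hWFr := pvWF_tail hWF
      have hrl : rest.length ≤ n := by simp at hr; omega
      have htile1 : pvTile (c - s) = true ↔ pvTileN (c - s).toNat := by
        simp only [pvTile, pvTileN, Bool.or_eq_true, beq_iff_eq, decide_eq_true_eq]
        omega
      have ih0 : pvGrun rest 0 = true ↔ pvChunks (pvDecode rest) := by
        have := ih rest hrl hWFr 0 (by norm_num) (by norm_num) (by simp)
        simpa using this
      rcases hrest : rest with _ | ⟨⟨v1,c1⟩, rest'⟩
      · constructor
        · intro hg
          simp only [pvGrun] at hg
          exact Or.inl ⟨htile1.mp hg, by simpa [pvDecode] using pvChunks.nil⟩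
        · rintro (⟨hT, -⟩ | ⟨t2, -, -, he, -⟩)
          · simp only [pvGrun]
            exact htile1.mpr hT
          · exact absurd he (by simp [pvDecode])
      · subst hrest
        have hc1 : (1:Int) ≤ c1 := hWF.1 (v1,c1) (by simp)
        rcases hrest' : rest' with _ | ⟨⟨v2,c2⟩, rest2⟩
        · -- rest is a single run: no crossing possible
          subst hrest'
          constructor
          · intro hg
            simp only [pvGrun, Bool.and_eq_true] at hg
            obtain ⟨ht, hg⟩ := hg
            exact Or.inl ⟨htile1.mp ht, ih0.mp (by simpa [pvGrun] using hg)⟩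
          · rintro (⟨hT, hch⟩ | ⟨t2, -, -, he, -⟩)
            · simp only [pvGrun, Bool.and_eq_true]
              have := ih0.mpr hch
              exact ⟨htile1.mpr hT, by simpa [pvGrun] using this⟩
            · exfalso
              obtain ⟨m1, hm1⟩ : ∃ m1, c1.toNat = m1 + 1 := ⟨c1.toNat - 1, by omega⟩
              simp only [pvDecode, List.flatMap_cons, List.flatMap_nil, List.append_nil,
                hm1, List.replicate_succ, List.cons.injEq] at he
              rcases m1 with _ | m1
              · simp at he
              · simp only [List.replicate_succ, List.cons.injEq] at he
                omega
        · -- rest has at least two runs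
          subst hrest'
          have hc2 : (1:Int) ≤ c2 := hWF.1 (v2,c2) (by simp)
          have hWFr2 : pvWF ((v2,c2) :: rest2) := pvWF_tail hWFr
          have hr2 : ((v2,c2) :: rest2).length ≤ n := by simp at hr ⊢; omega
          have ih1 : pvGrun ((v2,c2) :: rest2) 1 = true ↔
              pvChunks (List.replicate (c2 - 1).toNat v2 ++ pvDecode rest2) := by
            have := ih ((v2,c2) :: rest2) hr2 hWFr2 1 (by norm_num) (by norm_num)
              (by simp)
            rwa [decode_cons_drop v2 c2 rest2 1 hc2 (by norm_num) (by norm_num)] at this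
          have htile2 : pvTile (c - s - 1) = true ↔
              (1 ≤ (c - s).toNat ∧ pvTileN ((c - s).toNat - 1)) := by
            simp only [pvTile, pvTileN, Bool.or_eq_true, beq_iff_eq, decide_eq_true_eq]
            omega
          have hdec2 : pvDecode ((v1,c1) :: (v2,c2) :: rest2)
              = List.replicate c1.toNat v1 ++ (List.replicate c2.toNat v2 ++ pvDecode rest2) := by
            simp [pvDecode]
          have hround : pvGrun ((v,c) :: (v1,c1) :: (v2,c2) :: rest2) s =
              ((pvTile (c - s) && pvGrun ((v1,c1) :: (v2,c2) :: rest2) 0) ||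
               ((decide (v1 = v + 1) && decide (c1 = (1:Int)) && decide (v2 = v + 2)) &&
                pvTile (c - s - 1) && pvGrun ((v2,c2) :: rest2) 1)) := by
            rw [pvGrun]
          rw [hround]
          simp only [Bool.or_eq_true, Bool.and_eq_true, decide_eq_true_eq]
          constructor
          · rintro (⟨ht, hg⟩ | ⟨⟨⟨⟨hv1, hc1e⟩, hv2⟩, ht⟩, hg⟩)
            · exact Or.inl ⟨htile1.mp ht, ih0.mp hg⟩
            · obtain ⟨hk1, hT⟩ := htile2.mp ht
              obtain ⟨m2, hm2⟩ : ∃ m2, c2.toNat = m2 + 1 := ⟨c2.toNat - 1, by omega⟩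
              refine Or.inr ⟨List.replicate (c2 - 1).toNat v2 ++ pvDecode rest2, hk1, hT, ?_,
                ih1.mp hg⟩
              rw [hdec2, hc1e, hv1, hv2]
              have hm2' : (c2 - 1).toNat = m2 := by omega
              simp [hm2, hm2', List.replicate_succ]
          · rintro (⟨hT, hch⟩ | ⟨t2, hk1, hT, he, hch⟩)
            · exact Or.inl ⟨htile1.mpr hT, ih0.mpr hch⟩
            · -- decode the shape of the tail to recover the crossing conditions
              rw [hdec2] at he
              obtain ⟨m1, hm1⟩ : ∃ m1, c1.toNat = m1 + 1 := ⟨c1.toNat - 1, by omega⟩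
              rw [hm1, List.replicate_succ, List.cons_append, List.cons.injEq] at he
              obtain ⟨hv1, he2⟩ := he
              rcases m1 with _ | m1
              · simp only [List.replicate_zero, List.nil_append] at he2
                obtain ⟨m2, hm2⟩ : ∃ m2, c2.toNat = m2 + 1 := ⟨c2.toNat - 1, by omega⟩
                rw [hm2, List.replicate_succ, List.cons_append, List.cons.injEq] at he2
                obtain ⟨hv2, he3⟩ := he2
                refine Or.inr ⟨⟨⟨⟨hv1, by omega⟩, hv2⟩, htile2.mpr ⟨hk1, hT⟩⟩, ?_⟩
                apply ih1.mpr
                have hm2' : (c2 - 1).toNat = m2 := by omega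
                rw [hm2']
                rw [← he3] at hch
                exact hch
              · rw [List.replicate_succ, List.cons_append, List.cons.injEq] at he2
                exact absurd (hv1.symm.trans he2.1) (by omega)

-- helpers for reading B's loop state
theorem pvBoolIff {x y : Bool} (h : x = true ↔ y = true) : x = y := by
  rw [Bool.eq_iff_iff]; exact h

-- state of B's backward loop once all cells ≥ j are filled
def pvFst (runs : List (Int × Int)) (j : Nat) : List (Bool × Bool) :=
  (List.range (runs.length + 1)).map (fun i =>
    if j ≤ i then
      (pvGrun (runs.drop i) 0, if i < runs.length then pvGrun (runs.drop i) 1 else false)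
    else (false, false))

theorem length_pvFst (runs : List (Int × Int)) (j : Nat) :
    (pvFst runs j).length = runs.length + 1 := by
  simp [pvFst]

theorem getD_pvFst (runs : List (Int × Int)) (j i : Nat) (hi : i < runs.length + 1) :
    (pvFst runs j).getD i (false, false) =
      if j ≤ i then
        (pvGrun (runs.drop i) 0, if i < runs.length then pvGrun (runs.drop i) 1 else false)
      else (false, false) := by
  rw [List.getD_eq_getElem _ _ (by rw [length_pvFst]; omega)]
  simp [pvFst]

theorem pvFst_set (runs : List (Int × Int)) (j : Nat) (hj : j < runs.length) :
    (pvFst runs (j+1)).set j (pvGrun (runs.drop j) 0, pvGrun (runs.drop j) 1)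
      = pvFst runs j := by
  apply List.ext_getElem
  · simp [pvFst]
  · intro i h1 h2
    rw [List.getElem_set]
    simp only [pvFst, List.getElem_map, List.getElem_range]
    by_cases he : j = i
    · subst he
      simp [hj]
    · have hiff : (j + 1 ≤ i) = (j ≤ i) := propext (by constructor <;> omega)
      simp [he, hiff]

theorem B_step (runs : List (Int × Int)) (hc : ∀ p ∈ runs, (1:Int) ≤ p.2) (j : Nat)
    (hj : j < runs.length) :
    solution_1637_3_alt_body runs (runs.length : Int) (pvFst runs (j+1)) (j : Int)
      = pvFst runs j := by
  have e1 : (j : Int) + 1 = ((j + 1 : Nat) : Int) := by push_cast; ring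
  have e2 : (j : Int) + 2 = ((j + 2 : Nat) : Int) := by push_cast; ring
  rcases hvc : runs[j] with ⟨v, c⟩
  have hget : runs.getD j ((0:Int),(0:Int)) = (v, c) := by
    rw [List.getD_eq_getElem _ _ hj, hvc]
  have hcj : (1:Int) ≤ c := by
    have := hc runs[j] (List.getElem_mem hj)
    rwa [hvc] at this
  have hf1 : (pvFst runs (j+1)).getD (j+1) (false, false)
      = (pvGrun (runs.drop (j+1)) 0,
         if j+1 < runs.length then pvGrun (runs.drop (j+1)) 1 else false) := by
    rw [getD_pvFst runs (j+1) (j+1) (by omega), if_pos le_rfl]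
  have hdj : runs.drop j = (v, c) :: runs.drop (j+1) := by
    rw [List.drop_eq_getElem_cons hj, hvc]
  simp only [solution_1637_3_alt_body, e1, e2, PySem.List.pyGetD_natCast,
    PySem.List.pySetD_natCast, hget, hf1]
  rw [← pvFst_set runs j hj]
  congr 1
  by_cases h2 : j + 2 < runs.length
  · -- two more runs follow: the crossing clause is live
    rcases hv1 : runs[j+1] with ⟨v1, c1⟩
    rcases hv2 : runs[j+2] with ⟨v2, c2⟩
    have hget1 : runs.getD (j+1) ((0:Int),(0:Int)) = (v1, c1) := by
      rw [List.getD_eq_getElem _ _ (by omega), hv1]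
    have hget2 : runs.getD (j+2) ((0:Int),(0:Int)) = (v2, c2) := by
      rw [List.getD_eq_getElem _ _ (by omega), hv2]
    have hd1 : runs.drop (j+1) = (v1, c1) :: runs.drop (j+2) := by
      rw [List.drop_eq_getElem_cons (by omega : j+1 < runs.length), hv1]
    have hd2 : runs.drop (j+2) = (v2, c2) :: runs.drop (j+3) := by
      rw [List.drop_eq_getElem_cons (by omega : j+2 < runs.length), hv2]
    have hf2 : (pvFst runs (j+1)).getD (j+2) (false, false)
        = (pvGrun (runs.drop (j+2)) 0, pvGrun (runs.drop (j+2)) 1) := by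
      rw [getD_pvFst runs (j+1) (j+2) (by omega), if_pos (by omega), if_pos (by omega)]
    have hm : (decide (((j + 2 : Nat) : Int) < (runs.length : Int))) = true := by
      simp; omega
    have hgr : ∀ s : Int, pvGrun (runs.drop j) s =
        ((pvTile (c - s) && pvGrun (runs.drop (j+1)) 0) ||
         ((decide (v1 = v+1) && decide (c1 = (1:Int)) && decide (v2 = v+2)) &&
          pvTile (c - s - 1) && pvGrun (runs.drop (j+2)) 1)) := by
      intro s
      conv_lhs => rw [hdj, hd1, hd2]
      conv_rhs => rw [hd1, hd2]
      rw [pvGrun]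
    rw [hget1, hget2, hf2, hm, Prod.mk.injEq]
    refine ⟨?_, ?_⟩
    · rw [hgr 0]
      apply pvBoolIff
      generalize pvGrun (runs.drop (j+1)) 0 = a
      generalize pvGrun (runs.drop (j+2)) 1 = b
      rcases a <;> rcases b <;> simp [pvTile, Prod.ext_iff] <;> omega
    · rw [hgr 1]
      apply pvBoolIff
      generalize pvGrun (runs.drop (j+1)) 0 = a
      generalize pvGrun (runs.drop (j+2)) 1 = b
      rcases a <;> rcases b <;> simp [pvTile, Prod.ext_iff] <;> omega
  · -- at most one more run: no crossing is possible
    have hm : (decide (((j + 2 : Nat) : Int) < (runs.length : Int))) = false := by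
      simp; omega
    have hgr : ∀ s : Int, pvGrun (runs.drop j) s =
        (pvTile (c - s) && pvGrun (runs.drop (j+1)) 0) := by
      intro s
      rcases hshape : runs.drop (j+1) with _ | ⟨⟨w, d⟩, rem⟩
      · rw [hdj, hshape]
        simp [pvGrun]
      · rcases rem with _ | ⟨q2, rem2⟩
        · rw [hdj, hshape]
          simp [pvGrun]
        · exfalso
          have := congrArg List.length hshape
          simp at this
          omega
    rw [hm, Prod.mk.injEq]
    refine ⟨?_, ?_⟩
    · rw [hgr 0]
      apply pvBoolIff
      generalize pvGrun (runs.drop (j+1)) 0 = a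
      rcases a <;> simp [pvTile] <;> omega
    · rw [hgr 1]
      apply pvBoolIff
      generalize pvGrun (runs.drop (j+1)) 0 = a
      rcases a <;> simp [pvTile] <;> omega

theorem alt_eq_pvGrun (nums : List Int)
    (hc : ∀ p ∈ nums.foldl solution_1637_3_alt_runstep [], (1:Int) ≤ p.2) :
    solution_1637_3_alt nums =
      pvGrun (nums.foldl solution_1637_3_alt_runstep []) 0 := by
  simp only [solution_1637_3_alt]
  set runs := nums.foldl solution_1637_3_alt_runstep [] with hr
  have e : (((runs.length : Int)) + 1).toNat = runs.length + 1 := by omega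
  have hinit : PySem.List.pySetD
      (List.replicate (((runs.length : Int)) + 1).toNat ((false:Bool),(false:Bool)))
      ((runs.length : Int)) ((true:Bool),(false:Bool)) = pvFst runs runs.length := by
    rw [e, PySem.List.pySetD_natCast]
    apply List.ext_getElem
    · simp [pvFst]
    · intro k hk1 hk2
      rw [List.getElem_set]
      simp only [pvFst, List.getElem_map, List.getElem_range, List.getElem_replicate]
      by_cases hek : runs.length = k
      · subst hek
        simp [pvGrun]
      · have hnk : ¬ (runs.length ≤ k) := by
          have hk : k < runs.length + 1 := by simpa using hk1
          omega
        simp [hek, hnk]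
  rw [hinit,
    foldl_pyRange_down (solution_1637_3_alt_body runs ((runs.length : Int))) (pvFst runs)
      runs.length (fun i hi => B_step runs hc i hi)]
  rw [show ((0:Int)) = ((0:Nat):Int) from rfl, PySem.List.pyGetD_natCast]
  rw [getD_pvFst runs 0 0 (by omega)]
  simp

-- ===== VERDICT (by name: the statement is the Claim_ definition above) =====
theorem solution_1637_3_spec : Claim_equal_solution_1637_3 := by
  intro nums _
  unfold Spec_solution_1637_3
  obtain ⟨hWF, hdec⟩ := runs_fold_spec nums [] ⟨by simp, by simp⟩
  have hB : solution_1637_3_alt nums = true ↔ pvChunks nums := by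
    rw [alt_eq_pvGrun nums hWF.1]
    have h := pvGrun_iff_chunks _ hWF 0 (by norm_num) (by norm_num) (by simp)
    have h2 : (pvDecode (nums.foldl solution_1637_3_alt_runstep [])).drop (0:Int).toNat = nums := by
      simpa [pvDecode] using hdec
    rwa [h2] at h
  have hA : solution_1637_3 nums = true ↔ pvChunks nums := by
    rw [solution_eq_arec]
    simpa using pvArec_iff_chunks nums nums.length (le_refl _)
  rcases ha : solution_1637_3 nums <;> rcases hb : solution_1637_3_alt nums
  · rfl
  · exact absurd (hA.mpr (hB.mp hb)) (by simp [ha])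
  · exact absurd (hB.mpr (hA.mp ha)) (by simp [hb])
  · rfl
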